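-- pv_equiv track=rewrite | github.com/SeokcheonMoon/study_pythons | docs/codingtest_pg/120912.py | solution
-- ===== SOURCE A (Python) =====
-- def solution(array):
--     split_array = []
--     for x in range(len(array)):
--         split_array.append(str(array[x]))
--
--     join_array = "".join(split_array)
--     list_array = list(map(int,join_array))
--     answer = list_array.count(7)
--     return answer
-- ===== SOURCE B (Python) =====
-- def solution(array):
--     answer = 0
--     for n in array:
--         n = abs(n)
--         while n:
--             if n % 10 == 7:
--                 answer += 1
--             n //= 10
--     return answer
-- ===== Notes on version B (the rewrite author's own statement) =====
-- stated objective: alternative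
-- what changed: Replaces the string pipeline (stringify every element, join, re-parse each character with int, count 7) by pure arithmetic: B extracts digits of abs(n) with n % 10 / n //= 10 and counts residues equal to 7, never building a string.
-- crash fix: On arrays containing a negative number A raises ValueError (int('-') while re-parsing the joined string character by character); B returns the digit-7 count of the absolute values, e.g. 2 on [-7, 17]. — e.g. on solution([-7, 17]): A raises ValueError, B returns 2
import Mathlib
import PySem

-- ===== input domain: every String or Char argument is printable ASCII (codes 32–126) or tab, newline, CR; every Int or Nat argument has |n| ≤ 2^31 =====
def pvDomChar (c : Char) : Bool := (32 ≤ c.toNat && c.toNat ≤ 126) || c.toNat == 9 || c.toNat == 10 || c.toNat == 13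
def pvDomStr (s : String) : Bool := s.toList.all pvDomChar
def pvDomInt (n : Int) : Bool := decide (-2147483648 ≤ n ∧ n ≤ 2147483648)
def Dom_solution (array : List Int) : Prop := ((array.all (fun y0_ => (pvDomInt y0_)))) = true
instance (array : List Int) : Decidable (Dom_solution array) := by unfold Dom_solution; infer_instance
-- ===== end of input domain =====

-- B replaces A's string pipeline (stringify, join, re-parse every character with int(), count)
-- by pure arithmetic: it extracts the digits of abs(n) with n % 10 / n //= 10 and counts
-- the residues equal to 7, never building a string (objective: alternative).

-- ===== PORT A =====
def solution (array : List Int) : Int :=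
  let split_array := (PySem.List.pyRange 0 (PySem.List.len array) 1).foldl
      (fun acc x => acc ++ [PySem.Int.toStr (PySem.List.pyGetD array x 0)]) []
  let join_array := PySem.Str.join "" split_array
  -- list(map(int, join_array)): int(ch) is PySem.Int.ofStr?; 'none' is where Python raises ValueError
  let list_array := join_array.toList.map (fun c => PySem.Int.ofStr? (String.ofList [c]))
  ((list_array.count (some 7) : Nat) : Int)

-- ===== PORT B =====
-- the 'while n:' loop of Source B: digits of a nonnegative number by repeated % 10 and // 10
-- (fuel n+1 only makes the recursion structural; it is never exhausted while n ≠ 0)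
def countSevensGo : Nat → Nat → Nat
  | 0, _ => 0
  | fuel+1, n => if n = 0 then 0 else (if n % 10 = 7 then 1 else 0) + countSevensGo fuel (n / 10)

def countSevens (n : Nat) : Nat := countSevensGo (n+1) n

def solution_alt (array : List Int) : Int :=
  -- 'n = abs(n)' is n.natAbs; the while loop is countSevens
  array.foldl (fun acc n => acc + ((countSevens n.natAbs : Nat) : Int)) 0

-- ===== PRECONDITION & SPEC =====
-- Pre_ excludes arrays containing a negative number: there A raises ValueError (int('-') while
-- re-parsing the joined string character by character), so A returns on exactly the inputs Pre_ admits.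
def Pre_solution (array : List Int) : Prop := ∀ n ∈ array, 0 ≤ n
instance (array : List Int) : Decidable (Pre_solution array) := by unfold Pre_solution; infer_instance
def pvWitness_solution : List Int := [7, 17, 770]

-- On arrays containing a negative number A raises ValueError; B returns the digit-7 count of the absolute values (2 on [-7, 17]).
def Raises_solution (array : List Int) : Prop := ∃ n ∈ array, n < 0
instance (array : List Int) : Decidable (Raises_solution array) := by unfold Raises_solution; infer_instance
def pvRaiseWitness_solution : List Int := [-7, 17]
def pvRaiseWitnessOut_solution : Int := 2

def Spec_solution (array : List Int) (out : Int) : Prop := out = solution_alt array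
instance (array : List Int) (out : Int) : Decidable (Spec_solution array out) := by unfold Spec_solution; infer_instance

-- ===== CLAIM (what is proved, stated in full; the proofs are below) =====
def Claim_equal_solution : Prop := ∀ (array : List Int), Dom_solution array → Pre_solution array → Spec_solution array (solution array)
def Claim_raises_solution : Prop := (∀ (array : List Int), Dom_solution array → Raises_solution array → ¬ Pre_solution array) ∧ (Dom_solution (pvRaiseWitness_solution) ∧ Raises_solution (pvRaiseWitness_solution) ∧ solution_alt (pvRaiseWitness_solution) = pvRaiseWitnessOut_solution)

-- ===== LEMMAS AND PROOFS =====

theorem digit_mem (c : Char) (h : c.isDigit = true) :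
    c ∈ ['0','1','2','3','4','5','6','7','8','9'] := by
  simp [Char.isDigit] at h
  obtain ⟨h1, h2⟩ := h
  have hc : c = Char.ofNat c.toNat := (Char.ofNat_toNat c).symm
  have h1' : 48 <= c.toNat := h1
  have h2' : c.toNat <= 57 := h2
  interval_cases h3 : c.toNat <;> rw [hc] <;> decide

theorem ofChars?_digit_seven (c : Char) (h : c.isDigit = true) :
    PySem.Int.ofChars? [c] = some 7 ↔ c = '7' := by
  have hm := digit_mem c h
  simp only [List.mem_cons] at hm
  rcases hm with rfl|rfl|rfl|rfl|rfl|rfl|rfl|rfl|rfl|rfl|hm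
  · decide
  · decide
  · decide
  · decide
  · decide
  · decide
  · decide
  · decide
  · decide
  · decide
  · simp at hm

theorem count_map_digits (cs : List Char) (h : ∀ c ∈ cs, c.isDigit = true) :
    (cs.map (fun c => PySem.Int.ofStr? (String.ofList [c]))).count (some 7) = cs.count '7' := by
  induction cs with
  | nil => rfl
  | cons x t ih =>
      have hx := h x (List.mem_cons_self)
      have ht := ih (fun c hc => h c (List.mem_cons_of_mem _ hc))
      simp only [List.map_cons, List.count_cons, ht]
      by_cases h7 : x = '7'
      · simp [h7, PySem.Int.ofStr?]
        decide
      · have hne : ¬ (PySem.Int.ofChars? [x] = some 7) :=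
          fun hh => h7 ((ofChars?_digit_seven x hx).mp hh)
        simp [h7, PySem.Int.ofStr?, hne]

-- the fuel argument is irrelevant as long as it exceeds n
theorem countSevensGo_fuel (f1 : Nat) : ∀ (f2 n : Nat), n < f1 → n < f2 →
    countSevensGo f1 n = countSevensGo f2 n := by
  induction f1 with
  | zero => intro f2 n h; omega
  | succ f ih =>
      intro f2 n h1 h2
      cases f2 with
      | zero => omega
      | succ g =>
          simp only [countSevensGo]
          by_cases h0 : n = 0
          · simp [h0]
          · have hlt : n / 10 < n := Nat.div_lt_self (Nat.pos_of_ne_zero h0) (by norm_num)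
            rw [if_neg h0, if_neg h0, ih g (n / 10) (by omega) (by omega)]

theorem countSevens_unfold (n : Nat) (h : n ≠ 0) :
    countSevens n = (if n % 10 = 7 then 1 else 0) + countSevens (n / 10) := by
  have hlt : n / 10 < n := Nat.div_lt_self (Nat.pos_of_ne_zero h) (by norm_num)
  have h1 : countSevensGo (n + 1) n
      = if n = 0 then 0 else (if n % 10 = 7 then 1 else 0) + countSevensGo n (n / 10) := rfl
  unfold countSevens
  rw [h1, if_neg h, countSevensGo_fuel n (n / 10 + 1) (n / 10) hlt (by omega)]

-- the digit character of n % 10 is '7' exactly when the residue is 7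
theorem digitChar_seven (n : Nat) : ((n % 10).digitChar = '7') ↔ (n % 10 = 7) := by
  have h : n % 10 < 10 := Nat.mod_lt _ (by norm_num)
  interval_cases hk : (n % 10) <;> decide

-- the core of Nat.toDigits counts '7' exactly as the arithmetic loop does
theorem toDigitsCore_count (fuel : Nat) : ∀ (n : Nat) (ds : List Char), n < fuel →
    (Nat.toDigitsCore 10 fuel n ds).count '7'
      = ((if n % 10 = 7 then 1 else 0) + countSevens (n / 10)) + ds.count '7' := by
  induction fuel with
  | zero => intro n ds h; omega
  | succ f ih =>
      intro n ds h
      simp only [Nat.toDigitsCore]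
      by_cases h0 : n / 10 = 0
      · rw [if_pos h0, h0]
        simp only [List.count_cons, show countSevens 0 = 0 from rfl, Nat.add_zero]
        by_cases h7 : n % 10 = 7
        · rw [h7]
          simp [(by decide : Nat.digitChar 7 = '7'), Nat.add_comm]
        · have : ¬ ((n % 10).digitChar = '7') := fun hh => h7 ((digitChar_seven n).mp hh)
          simp [h7, this]
      · rw [if_neg h0]
        have hn10 : 10 ≤ n := by
          by_contra hlt
          exact h0 (Nat.div_eq_of_lt (by omega))
        have hlt : n / 10 < f := by
          have := Nat.div_lt_self (by omega : 0 < n) (by norm_num : 1 < 10)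
          omega
        rw [ih (n / 10) _ hlt, countSevens_unfold (n / 10) h0]
        simp only [List.count_cons]
        by_cases h7 : n % 10 = 7
        · rw [h7]
          simp [(by decide : Nat.digitChar 7 = '7')]
          omega
        · have : ¬ ((n % 10).digitChar = '7') := fun hh => h7 ((digitChar_seven n).mp hh)
          simp [h7, this]

theorem toDigits_count_sevens (m : Nat) :
    (Nat.toDigits 10 m).count '7' = countSevens m := by
  by_cases h0 : m = 0
  · subst h0; decide
  · rw [Nat.toDigits, toDigitsCore_count (m + 1) m [] (by omega)]
    rw [countSevens_unfold m h0]
    simp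

-- per element: the string-side '7' count on str(n) equals the arithmetic loop, for n ≥ 0
theorem per_elem (n : Int) (hn : 0 <= n) :
    ((PySem.Int.toChars n).map (fun c => PySem.Int.ofStr? (String.ofList [c]))).count (some 7)
      = countSevens n.natAbs := by
  have hdig : ∀ c ∈ PySem.Int.toChars n, c.isDigit = true := by
    intro c hc
    simp only [PySem.Int.toChars, if_neg (by omega : ¬ n < 0)] at hc
    exact Nat.isDigit_of_mem_toDigits (by norm_num) (by norm_num) hc
  rw [count_map_digits _ hdig]
  simp only [PySem.Int.toChars, if_neg (by omega : ¬ n < 0)]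
  rw [toDigits_count_sevens]
  congr 1
  omega

theorem join_empty_flatten (L : List (List Char)) : PySem.Chars.join [] L = L.flatten := by
  induction L with
  | nil => simp [PySem.Chars.join_nil]
  | cons a t ih =>
      cases t with
      | nil => simp [PySem.Chars.join_singleton]
      | cons b u => simp [PySem.Chars.join_cons_cons] at ih ⊢; simp [ih]

theorem solution_spec : Claim_equal_solution := by
  intro array _ hpre
  unfold Spec_solution solution solution_alt
  simp only [PySem.List.foldl_append_singleton_eq_map, List.nil_append]
  have hmap : List.map (fun x => PySem.Int.toStr (PySem.List.pyGetD array x 0))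
      (PySem.List.pyRange 0 (PySem.List.len array)) = array.map PySem.Int.toStr := by
    conv_rhs => rw [← PySem.List.map_pyGetD_pyRange_zero array 0]
    rw [List.map_map]
    rfl
  rw [hmap]
  simp only [PySem.Str.toList_join, PySem.List.foldl_add, Int.zero_add]
  rw [show ("".toList) = ([] : List Char) from rfl, join_empty_flatten,
    List.map_flatten, List.count_flatten]
  simp only [List.map_map, Function.comp_def, PySem.Int.toList_toStr]
  rw [List.map_congr_left (fun n hn => by
    rw [per_elem n (hpre n hn)] : ∀ n ∈ array,
      (((PySem.Int.toChars n).map (fun c => PySem.Int.ofStr? (String.ofList [c]))).count (some 7))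
        = countSevens n.natAbs)]
  rw [Nat.cast_list_sum, List.map_map]
  rfl

@[simp] theorem solution_raises : Claim_raises_solution := by
  unfold Claim_raises_solution
  constructor
  · rintro array _ ⟨n, hn, hneg⟩ hpre
    exact absurd (hpre n hn) (by omega)
  · exact ⟨by decide, ⟨-7, by simp [pvRaiseWitness_solution], by norm_num⟩, by decide⟩
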